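-- pv_equiv track=rewrite | github.com/Yonatan-Tomer/HW1_ai | ex1_325028967_213125164.py | check_impossible
-- ===== SOURCE A (Python) =====
-- def check_impossible(treasures, map_):
--     # check if there is no way to retrieve all the treasures
--     for name, loc in treasures:
--         if not loc[0] == 0:  # up
--             if map_[loc[0] - 1][loc[1]] != 'I':
--                 continue
--         if not loc[0] == len(map_) - 1:  # down
--             if map_[loc[0] + 1][loc[1]] != 'I':
--                 continue
--         if not loc[1] == 0:  # left
--             if map_[loc[0]][loc[1] - 1] != 'I':
--                 continue
--         if not loc[1] == len(map_[0]) - 1:  # right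
--             if map_[loc[0]][loc[1] + 1] != 'I':
--                 continue
--         return True
--     return False
-- ===== SOURCE B (Python) =====
-- def check_impossible(treasures, map_):
--     # Precompute the set of all trapped grid cells (every side is map edge or
--     # island) in one scan of the map, then test treasure locations by membership.
--     if not treasures:
--         return False
--     rows = len(map_)
--     cols = len(map_[0]) if map_ else 0
--     trapped = set()
--     for r in range(rows):
--         for c in range(cols):
--             if ((r == 0 or map_[r - 1][c] == 'I')
--                     and (r == rows - 1 or map_[r + 1][c] == 'I')
--                     and (c == 0 or map_[r][c - 1] == 'I')
--                     and (c == cols - 1 or map_[r][c + 1] == 'I')):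
--                 trapped.add((r, c))
--     return any((loc[0], loc[1]) in trapped for _, loc in treasures)
-- ===== Notes on version B (the rewrite author's own statement) =====
-- stated objective: alternative
-- what changed: Instead of testing each treasure's four neighbours with A's if/continue chain, B scans the whole map once, precomputes the set of all trapped cells, and then answers each treasure by a set-membership lookup.
-- outside the precondition, e.g. on check_impossible([('t', [-1, 0])], [['I'], ['I'], ['.']]): A returns True, B returns False; on check_impossible([('t', [-1, 0])], [['I'], ['I']]): A returns True, B returns False; on check_impossible([('t', [0, 0])], [['.', '.'], ['.']]): A returns False, B raises IndexError
import Mathlib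
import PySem

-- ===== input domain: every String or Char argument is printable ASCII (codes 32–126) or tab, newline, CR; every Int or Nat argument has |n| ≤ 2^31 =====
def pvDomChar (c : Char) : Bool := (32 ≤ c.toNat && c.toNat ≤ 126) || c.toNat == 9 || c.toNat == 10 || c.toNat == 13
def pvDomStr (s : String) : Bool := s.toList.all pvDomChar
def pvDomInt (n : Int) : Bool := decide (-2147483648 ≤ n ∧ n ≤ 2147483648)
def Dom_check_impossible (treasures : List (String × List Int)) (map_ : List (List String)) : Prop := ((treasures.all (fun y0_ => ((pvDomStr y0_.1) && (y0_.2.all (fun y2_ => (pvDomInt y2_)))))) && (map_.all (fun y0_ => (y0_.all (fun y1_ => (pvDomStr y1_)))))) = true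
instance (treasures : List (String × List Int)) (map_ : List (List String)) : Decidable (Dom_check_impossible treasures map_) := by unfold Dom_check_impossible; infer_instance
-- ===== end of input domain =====

-- B replaces A's per-treasure if/continue neighbour probing by a single scan of the
-- whole map that precomputes the set of trapped cells, answering treasures by
-- set membership (objective: alternative).

-- ===== PORT A =====
-- map_[r][c] as A performs it (Python indexing, negative from the end; "" stands in
-- for the IndexError case, which Pre_ excludes)
def cellA (map_ : List (List String)) (r c : Int) : String :=
  ((PySem.List.pyGet? map_ r).bind (fun row => PySem.List.pyGet? row c)).getD ""

def check_impossible (treasures : List (String × List Int)) (map_ : List (List String)) : Bool :=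
  match treasures with
  | [] => false
  | (_, loc) :: rest =>
    let r := (PySem.List.pyGet? loc 0).getD 0
    let c := (PySem.List.pyGet? loc 1).getD 0
    if ¬ r = 0 ∧ cellA map_ (r - 1) c ≠ "I" then check_impossible rest map_        -- up
    else if ¬ r = (map_.length : Int) - 1 ∧ cellA map_ (r + 1) c ≠ "I" then check_impossible rest map_  -- down
    else if ¬ c = 0 ∧ cellA map_ r (c - 1) ≠ "I" then check_impossible rest map_   -- left
    else if ¬ c = (((PySem.List.pyGet? map_ 0).getD []).length : Int) - 1 ∧ cellA map_ r (c + 1) ≠ "I" then check_impossible rest map_  -- right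
    else true

-- ===== PORT B =====
-- map_[r][c] as B performs it during the scan (indices are in range there; ""
-- is the same stand-in default)
def cellB (map_ : List (List String)) (r c : Int) : String :=
  PySem.List.pyGetD (PySem.List.pyGetD map_ r []) c ""

-- the scan's four-way test for one cell
def trappedCell (map_ : List (List String)) (rows cols r c : Int) : Bool :=
  (decide (r = 0) || (cellB map_ (r - 1) c == "I")) &&
  (decide (r = rows - 1) || (cellB map_ (r + 1) c == "I")) &&
  (decide (c = 0) || (cellB map_ r (c - 1) == "I")) &&
  (decide (c = cols - 1) || (cellB map_ r (c + 1) == "I"))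

-- the precomputed set 'trapped'
-- cols = len(map_[0]) if map_ else 0
def colsB (map_ : List (List String)) : Int :=
  if map_.isEmpty then 0 else ((map_.headD []).length : Int)

def trappedSet (map_ : List (List String)) : PySem.Set (Int × Int) :=
  let rows : Int := (map_.length : Int)
  let cols : Int := colsB map_
  (PySem.List.pyRange 0 rows 1).foldl (fun s r =>
    (PySem.List.pyRange 0 cols 1).foldl (fun s c =>
      if trappedCell map_ rows cols r c then PySem.Set.add s (r, c) else s) s)
    PySem.Set.empty

def check_impossible_alt (treasures : List (String × List Int)) (map_ : List (List String)) : Bool :=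
  match treasures with
  | [] => false   -- if not treasures: return False
  | _ =>
    let trapped := trappedSet map_
    treasures.any (fun t =>
      PySem.Set.contains trapped
        ((PySem.List.pyGet? t.2 0).getD 0, (PySem.List.pyGet? t.2 1).getD 0))

-- ===== PRECONDITION & SPEC =====
-- map_[r][c] as Pre_ inspects it (Python indexing; none = the probe would raise)
def probeP (map_ : List (List String)) (r c : Int) : Option String :=
  (PySem.List.pyGet? map_ r).bind (fun row => PySem.List.pyGet? row c)

-- an out-of-grid treasure A skips safely: its first evaluated neighbour probe exists
-- under Python's (wraparound) indexing and is not an island, so A continues there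
def ContinueFast (map_ : List (List String)) (r c : Int) : Bool :=
  (r != 0 && (probeP map_ (r - 1) c).getD "I" != "I") ||
  (r == 0 && r != (map_.length : Int) - 1 && (probeP map_ (r + 1) c).getD "I" != "I") ||
  (r == 0 && r == (map_.length : Int) - 1 && c != 0 && (probeP map_ r (c - 1)).getD "I" != "I")

-- Pre_ excludes inputs where a treasure location is shorter than 2, or the grid has a
-- row shorter than row 0, or a treasure is neither inside the grid nor skipped at its
-- first evaluated probe: there A either raises IndexError or returns a value produced
-- by Python's negative-index wraparound, which B's grid scan never reproduces.
def Pre_check_impossible (treasures : List (String × List Int)) (map_ : List (List String)) : Prop :=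
  treasures = [] ∨
    ((∀ row ∈ map_, (map_.headD []).length ≤ row.length) ∧
      (∀ t ∈ treasures, 2 ≤ t.2.length ∧
        ((0 ≤ t.2.getD 0 0 ∧ t.2.getD 0 0 < (map_.length : Int) ∧
          0 ≤ t.2.getD 1 0 ∧ t.2.getD 1 0 < ((map_.headD []).length : Int)) ∨
         ContinueFast map_ (t.2.getD 0 0) (t.2.getD 1 0) = true)))
instance (treasures : List (String × List Int)) (map_ : List (List String)) : Decidable (Pre_check_impossible treasures map_) := by unfold Pre_check_impossible; infer_instance

def pvWitness_check_impossible : (List (String × List Int)) × List (List String) :=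
  ([("t", [1, 1])], [["I", "I", "I"], ["I", ".", "I"], ["I", "I", "I"]])

def Spec_check_impossible (treasures : List (String × List Int)) (map_ : List (List String)) (out : Bool) : Prop := out = check_impossible_alt treasures map_
instance (treasures : List (String × List Int)) (map_ : List (List String)) (out : Bool) : Decidable (Spec_check_impossible treasures map_ out) := by unfold Spec_check_impossible; infer_instance

-- ===== CLAIM (what is proved, stated in full; the proofs are below) =====
def Claim_equal_check_impossible : Prop := ∀ (treasures : List (String × List Int)) (map_ : List (List String)), Dom_check_impossible treasures map_ → Pre_check_impossible treasures map_ → Spec_check_impossible treasures map_ (check_impossible treasures map_)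

-- ===== LEMMAS AND PROOFS =====

lemma cellB_eq_cellA (map_ : List (List String)) (r c : Int) :
    cellB map_ r c = cellA map_ r c := by
  unfold cellB cellA PySem.List.pyGetD
  cases PySem.List.pyGet? map_ r with
  | none => simp [PySem.List.pyGet?]
  | some row => rfl

lemma mem_add_if {a : Type} [BEq a] [LawfulBEq a] (s : PySem.Set a) (b : Bool) (x y : a) :
    (y ∈ if b = true then PySem.Set.add s x else s) ↔ y ∈ s ∨ (b = true ∧ y = x) := by
  cases b <;> simp [PySem.Set.mem_add]

-- generic: membership after folding a conditional Set.add over a list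
lemma mem_foldl_step {a b : Type} [BEq a] [LawfulBEq a]
    (step : PySem.Set a → b → PySem.Set a) (Q : b → Prop) (y : a)
    (hstep : ∀ (s : PySem.Set a) (x : b), y ∈ step s x ↔ y ∈ s ∨ Q x)
    (l : List b) (s0 : PySem.Set a) :
    y ∈ l.foldl step s0 ↔ y ∈ s0 ∨ ∃ x ∈ l, Q x := by
  induction l generalizing s0 with
  | nil => simp
  | cons x xs ih =>
    simp only [List.foldl_cons, ih, hstep, List.mem_cons]
    constructor
    · rintro ((h | h) | ⟨z, hz, hq⟩)
      · exact Or.inl h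
      · exact Or.inr ⟨x, Or.inl rfl, h⟩
      · exact Or.inr ⟨z, Or.inr hz, hq⟩
    · rintro (h | ⟨z, (rfl | hz), hq⟩)
      · exact Or.inl (Or.inl h)
      · exact Or.inl (Or.inr hq)
      · exact Or.inr ⟨z, hz, hq⟩

-- membership in the precomputed trapped set
lemma mem_trappedSet (map_ : List (List String)) (r c : Int) :
    (r, c) ∈ trappedSet map_ ↔
      (0 ≤ r ∧ r < (map_.length : Int)) ∧ (0 ≤ c ∧ c < colsB map_) ∧
        trappedCell map_ (map_.length : Int) (colsB map_) r c = true := by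
  unfold trappedSet
  rw [mem_foldl_step _
      (fun r' => ∃ c' ∈ PySem.List.pyRange 0 (colsB map_) 1,
        trappedCell map_ (map_.length : Int) (colsB map_) r' c' = true ∧ (r, c) = (r', c')) (r, c)
      (fun s r' => mem_foldl_step _
        (fun c' => trappedCell map_ (map_.length : Int) (colsB map_) r' c' = true ∧ (r, c) = (r', c')) (r, c)
        (fun s c' => by
          simpa using mem_add_if s (trappedCell map_ (map_.length : Int) (colsB map_) r' c') (r', c') (r, c))
        _ s)]
  simp only [PySem.Set.empty]
  constructor
  · rintro (h | ⟨r', hr', c', hc', ht, he⟩)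
    · simp at h
    · obtain ⟨rfl, rfl⟩ := Prod.mk.injEq .. ▸ he
      exact ⟨(PySem.List.mem_pyRange_one.mp hr'), (PySem.List.mem_pyRange_one.mp hc'), ht⟩
  · rintro ⟨hr, hc, ht⟩
    exact Or.inr ⟨r, PySem.List.mem_pyRange_one.mpr hr, c, PySem.List.mem_pyRange_one.mpr hc, ht, rfl⟩

-- one treasure: A's early-continue chain equals (trappedCell || rec)
lemma head_eq (map_ : List (List String)) (hne : map_ ≠ []) (r c : Int) (rec : Bool) :
    (if ¬ r = 0 ∧ cellA map_ (r - 1) c ≠ "I" then rec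
     else if ¬ r = (map_.length : Int) - 1 ∧ cellA map_ (r + 1) c ≠ "I" then rec
     else if ¬ c = 0 ∧ cellA map_ r (c - 1) ≠ "I" then rec
     else if ¬ c = (((PySem.List.pyGet? map_ 0).getD []).length : Int) - 1 ∧ cellA map_ r (c + 1) ≠ "I" then rec
     else true)
      = (trappedCell map_ (map_.length : Int) (colsB map_) r c || rec) := by
  have hcols : (((PySem.List.pyGet? map_ 0).getD []).length : Int) = colsB map_ := by
    cases map_ with
    | nil => exact absurd rfl hne
    | cons h t => simp [PySem.List.pyGet?, PySem.List.pyIdx?, colsB]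
  unfold trappedCell
  rw [cellB_eq_cellA, cellB_eq_cellA, cellB_eq_cellA, cellB_eq_cellA, hcols] at *
  split_ifs with g1 g2 g3 g4
  · simp [g1.1, g1.2]
  · simp [g2.1, g2.2]
  · simp [g3.1, g3.2]
  · simp [g4.1, g4.2]
  · push Not at g1 g2 g3 g4
    have h1 : (decide (r = 0) || (cellA map_ (r - 1) c == "I")) = true := by
      by_cases h : r = 0
      · simp [h]
      · simp [h, g1 h]
    have h2 : (decide (r = (map_.length : Int) - 1) || (cellA map_ (r + 1) c == "I")) = true := by
      by_cases h : r = (map_.length : Int) - 1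
      · simp [h]
      · simp [h, g2 h]
    have h3 : (decide (c = 0) || (cellA map_ r (c - 1) == "I")) = true := by
      by_cases h : c = 0
      · simp [h]
      · simp [h, g3 h]
    have h4 : (decide (c = colsB map_ - 1) || (cellA map_ r (c + 1) == "I")) = true := by
      by_cases h : c = colsB map_ - 1
      · simp [h]
      · simp [h, g4 h]
    simp [h1, h2, h3, h4]

lemma alt_eq_any (treasures : List (String × List Int)) (map_ : List (List String)) :
    check_impossible_alt treasures map_ =
      treasures.any (fun t =>
        PySem.Set.contains (trappedSet map_)
          ((PySem.List.pyGet? t.2 0).getD 0, (PySem.List.pyGet? t.2 1).getD 0)) := by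
  cases treasures <;> rfl

lemma contains_trapped (map_ : List (List String)) (r c : Int)
    (hr0 : 0 ≤ r) (hr1 : r < (map_.length : Int))
    (hc0 : 0 ≤ c) (hc1 : c < ((map_.headD []).length : Int)) :
    PySem.Set.contains (trappedSet map_) (r, c) =
      trappedCell map_ (map_.length : Int) (colsB map_) r c := by
  have hne : map_ ≠ [] := by
    intro h; subst h; simp at hr1; omega
  have hcols : colsB map_ = ((map_.headD []).length : Int) := by
    cases map_ with
    | nil => exact absurd rfl hne
    | cons h t => simp [colsB]
  have hmem := mem_trappedSet map_ r c
  cases ht : trappedCell map_ (map_.length : Int) (colsB map_) r c with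
  | true =>
    have : (r, c) ∈ trappedSet map_ := hmem.mpr ⟨⟨hr0, hr1⟩, ⟨hc0, hcols ▸ hc1⟩, ht⟩
    simp [PySem.Set.contains, this]
  | false =>
    have : (r, c) ∉ trappedSet map_ := by
      intro h
      have := (hmem.mp h).2.2
      rw [ht] at this
      exact Bool.false_ne_true this
    simp [PySem.Set.contains, this]

lemma probe_getD_ne (map_ : List (List String)) (i j : Int)
    (h : (probeP map_ i j).getD "I" ≠ "I") : cellA map_ i j ≠ "I" := by
  unfold probeP at h
  unfold cellA
  cases heq : (PySem.List.pyGet? map_ i).bind (fun row => PySem.List.pyGet? row j) with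
  | none => rw [heq] at h; simp at h
  | some str => rw [heq] at h; simpa using h

-- one treasure: A's early-continue chain equals (set membership || rec) whenever the
-- treasure is in range or skipped at its first evaluated probe
lemma chain_eq (map_ : List (List String)) (r c : Int) (rec : Bool)
    (h : (0 ≤ r ∧ r < (map_.length : Int) ∧ 0 ≤ c ∧ c < ((map_.headD []).length : Int)) ∨
      ContinueFast map_ r c = true) :
    (if ¬ r = 0 ∧ cellA map_ (r - 1) c ≠ "I" then rec
     else if ¬ r = (map_.length : Int) - 1 ∧ cellA map_ (r + 1) c ≠ "I" then rec
     else if ¬ c = 0 ∧ cellA map_ r (c - 1) ≠ "I" then rec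
     else if ¬ c = (((PySem.List.pyGet? map_ 0).getD []).length : Int) - 1 ∧ cellA map_ r (c + 1) ≠ "I" then rec
     else true) = (PySem.Set.contains (trappedSet map_) (r, c) || rec) := by
  rcases h with ⟨h0, h1, h2, h3⟩ | hcf
  · have hne : map_ ≠ [] := by
      intro h; subst h; simp only [List.length_nil, Nat.cast_zero] at h1; omega
    rw [head_eq map_ hne, contains_trapped map_ r c h0 h1 h2 h3]
  · have hnotmem : (r, c) ∉ trappedSet map_ := by
      intro hm
      obtain ⟨⟨hr0, hr1⟩, ⟨hc0, hc1⟩, htc⟩ := (mem_trappedSet map_ r c).mp hm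
      unfold trappedCell at htc
      simp only [Bool.and_eq_true, Bool.or_eq_true, decide_eq_true_eq, beq_iff_eq,
        cellB_eq_cellA] at htc
      obtain ⟨⟨⟨t1, t2⟩, t3⟩, t4⟩ := htc
      unfold ContinueFast at hcf
      simp only [Bool.or_eq_true, Bool.and_eq_true, bne_iff_ne, beq_iff_eq, ne_eq] at hcf
      rcases hcf with (⟨hr, hp⟩ | ⟨⟨hr, hr2⟩, hp⟩) | ⟨⟨⟨hr, hr2⟩, hc⟩, hp⟩
      · rcases t1 with h | h
        · exact hr h
        · exact probe_getD_ne map_ _ _ hp h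
      · rcases t2 with h | h
        · exact hr2 h
        · exact probe_getD_ne map_ _ _ hp h
      · rcases t3 with h | h
        · exact hc h
        · exact probe_getD_ne map_ _ _ hp h
    have hcont : PySem.Set.contains (trappedSet map_) (r, c) = false := by
      simp [PySem.Set.contains, hnotmem]
    rw [hcont, Bool.false_or]
    unfold ContinueFast at hcf
    simp only [Bool.or_eq_true, Bool.and_eq_true, bne_iff_ne, beq_iff_eq, ne_eq] at hcf
    rcases hcf with (⟨hr, hp⟩ | ⟨⟨hr, hr2⟩, hp⟩) | ⟨⟨⟨hr, hr2⟩, hc⟩, hp⟩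
    · rw [if_pos ⟨hr, probe_getD_ne map_ _ _ hp⟩]
    · rw [if_neg (by tauto), if_pos ⟨hr2, probe_getD_ne map_ _ _ hp⟩]
    · rw [if_neg (by tauto), if_neg (by tauto), if_pos ⟨hc, probe_getD_ne map_ _ _ hp⟩]

lemma main_equiv (map_ : List (List String)) (treasures : List (String × List Int))
    (hpre : ∀ t ∈ treasures, 2 ≤ t.2.length ∧
        ((0 ≤ t.2.getD 0 0 ∧ t.2.getD 0 0 < (map_.length : Int) ∧
          0 ≤ t.2.getD 1 0 ∧ t.2.getD 1 0 < ((map_.headD []).length : Int)) ∨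
         ContinueFast map_ (t.2.getD 0 0) (t.2.getD 1 0) = true)) :
    check_impossible treasures map_ = check_impossible_alt treasures map_ := by
  induction treasures with
  | nil => rfl
  | cons t rest ih =>
    obtain ⟨name, loc⟩ := t
    obtain ⟨hlen, hdisj⟩ := hpre (name, loc) (List.mem_cons_self ..)
    have hrest := fun t ht => hpre t (List.mem_cons_of_mem _ ht)
    dsimp only at hlen hdisj
    have hg0 : (PySem.List.pyGet? loc 0).getD 0 = loc.getD 0 0 := by
      rw [show (0 : Int) = ((0 : Nat) : Int) by norm_num, PySem.List.pyGet?_natCast]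
      cases loc <;> simp
    have hg1 : (PySem.List.pyGet? loc 1).getD 0 = loc.getD 1 0 := by
      rw [show (1 : Int) = ((1 : Nat) : Int) by norm_num, PySem.List.pyGet?_natCast]
      match loc with
      | [] => simp at hlen
      | [x] => simp at hlen
      | x :: y :: _ => simp
    rw [alt_eq_any, List.any_cons]
    show (let r := (PySem.List.pyGet? loc 0).getD 0
          let c := (PySem.List.pyGet? loc 1).getD 0
          if ¬ r = 0 ∧ cellA map_ (r - 1) c ≠ "I" then check_impossible rest map_
          else if ¬ r = (map_.length : Int) - 1 ∧ cellA map_ (r + 1) c ≠ "I" then check_impossible rest map_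
          else if ¬ c = 0 ∧ cellA map_ r (c - 1) ≠ "I" then check_impossible rest map_
          else if ¬ c = (((PySem.List.pyGet? map_ 0).getD []).length : Int) - 1 ∧ cellA map_ r (c + 1) ≠ "I" then check_impossible rest map_
          else true) = _
    simp only []
    rw [hg0, hg1, ih hrest, alt_eq_any]
    exact chain_eq map_ (loc.getD 0 0) (loc.getD 1 0) _ hdisj

-- ===== VERDICT (by name: the statement is the Claim_ definition above) =====
theorem check_impossible_spec : Claim_equal_check_impossible := by
  intro treasures map_ _ hpre
  unfold Spec_check_impossible
  rcases hpre with rfl | ⟨_, hpre⟩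
  · rfl
  · exact main_equiv map_ treasures hpre
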